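-- pv_equiv track=rewrite | github.com/fabricenativel/NSITerminale | docs/Annales/Corriges/Sources/test_pile.py | parcourir_pile_en_reduisant
-- ===== SOURCE A (Python) =====
-- def creer_pile_vide():
--     return []
--
-- def est_vide(p):
--     return p==[]
--
-- def empiler(p,element):
--     p.append(element)
--
-- def depiler(p):
--     return p.pop()
--
-- def sommet(p):
--     return p[-1]
--
-- def taille(p):
--     return len(p)
--
-- def reduire_triplet_au_sommet(p):
--     a = depiler(p)
--     b = depiler(p)
--     c = sommet(p)
--     if a % 2 != c%2 :
--         empiler(p, b)
--     empiler(p, a)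
--
-- def parcourir_pile_en_reduisant(p):
--     q = creer_pile_vide()
--     np = p.copy()
--     while taille(np) >= 3:
--         reduire_triplet_au_sommet(np)
--         e = depiler(np)
--         empiler(q, e)
--     while not est_vide(q):
--         e = depiler(q)
--         empiler(np,e)
--     return np
-- ===== SOURCE B (Python) =====
-- def parcourir_pile_en_reduisant(p):
--     arr = p
--     L = len(arr)
--     moved = []
--     while L >= 3:
--         a = arr[L - 1]
--         c = arr[L - 3]
--         moved.append(a)
--         L -= 1 if a % 2 != c % 2 else 2
--     return arr[:L] + moved[::-1]
-- ===== Notes on version B (the rewrite author's own statement) =====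
-- stated objective: simpler
-- what changed: B never mutates a stack: it keeps the input list untouched, walks a length index L downward (L-=1 or 2 per triplet), collects moved tops in a list, and returns arr[:L] + moved[::-1], eliminating A's copy, its stack helpers and its entire second re-stacking loop.
import Mathlib
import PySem

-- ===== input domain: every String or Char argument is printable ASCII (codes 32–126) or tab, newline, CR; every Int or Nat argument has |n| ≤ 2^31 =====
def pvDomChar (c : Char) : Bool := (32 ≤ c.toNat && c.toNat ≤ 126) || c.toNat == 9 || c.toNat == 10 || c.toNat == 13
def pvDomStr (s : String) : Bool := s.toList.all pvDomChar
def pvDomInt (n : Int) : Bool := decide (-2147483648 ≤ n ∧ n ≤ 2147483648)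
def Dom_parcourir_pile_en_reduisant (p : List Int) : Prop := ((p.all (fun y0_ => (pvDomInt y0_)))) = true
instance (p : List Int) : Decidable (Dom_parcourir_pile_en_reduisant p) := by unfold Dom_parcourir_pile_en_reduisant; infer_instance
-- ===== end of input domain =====

-- B replaces A's two mutating stack loops (reduce-and-move to q, then re-stack q)
-- by an index L into the unchanged input plus one slice-and-reverse at the end (objective: simpler).

-- ===== PORT A =====
-- Python lists used as stacks: top = last element. empiler = append at end,
-- depiler = pop last, sommet = last. getLastD 0 is only evaluated on nonempty
-- stacks (the loop guard taille ≥ 3 ensures it), where it equals Python's p[-1]/p.pop().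

def pvReduireTriplet (p : List Int) : List Int :=
  let a := p.getLastD 0
  let p1 := p.dropLast
  let b := p1.getLastD 0
  let p2 := p1.dropLast
  let c := p2.getLastD 0
  let p3 := if PySem.Int.mod a 2 ≠ PySem.Int.mod c 2 then p2 ++ [b] else p2
  p3 ++ [a]

theorem pvReduireTriplet_len (p : List Int) (h : 3 ≤ p.length) :
    (pvReduireTriplet p).length ≤ p.length := by
  unfold pvReduireTriplet
  simp only []
  split_ifs <;>
    simp only [List.length_append, List.length_dropLast, List.length_cons, List.length_nil] <;>
    omega

-- first while loop: reduce the triplet at the top, then move the top to q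
def pvLoopA (np q : List Int) : List Int × List Int :=
  if h : 3 ≤ np.length then
    let np' := pvReduireTriplet np
    let e := np'.getLastD 0
    pvLoopA np'.dropLast (q ++ [e])
  else (np, q)
termination_by np.length
decreasing_by
  have := pvReduireTriplet_len np h
  simp [List.length_dropLast]
  omega

-- second while loop: pop q onto np until q is empty
def pvLoopQ (np q : List Int) : List Int :=
  if q = [] then np
  else pvLoopQ (np ++ [q.getLastD 0]) q.dropLast
termination_by q.length
decreasing_by
  rename_i h
  have : 0 < q.length := List.length_pos_iff.mpr h
  simp [List.length_dropLast]; omega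

def parcourir_pile_en_reduisant (p : List Int) : List Int :=
  let q : List Int := []
  let np := p
  let r := pvLoopA np q
  pvLoopQ r.1 r.2

-- ===== PORT B =====
-- the while loop of Source B: L is a nonnegative index into the untouched arr
def pvLoopB (arr : List Int) (L : Nat) (moved : List Int) : Nat × List Int :=
  if 3 ≤ L then
    let a := arr.getD (L - 1) 0
    let c := arr.getD (L - 3) 0
    let moved' := moved ++ [a]
    if PySem.Int.mod a 2 ≠ PySem.Int.mod c 2 then pvLoopB arr (L - 1) moved'
    else pvLoopB arr (L - 2) moved'
  else (L, moved)
termination_by L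
decreasing_by all_goals omega

def parcourir_pile_en_reduisant_alt (p : List Int) : List Int :=
  let r := pvLoopB p p.length []
  p.take r.1 ++ r.2.reverse

-- ===== PRECONDITION & SPEC =====
def Spec_parcourir_pile_en_reduisant (p : List Int) (out : List Int) : Prop := out = parcourir_pile_en_reduisant_alt p
instance (p : List Int) (out : List Int) : Decidable (Spec_parcourir_pile_en_reduisant p out) := by unfold Spec_parcourir_pile_en_reduisant; infer_instance

-- ===== CLAIM (what is proved, stated in full; the proofs are below) =====
def Claim_equal_parcourir_pile_en_reduisant : Prop := ∀ (p : List Int), Dom_parcourir_pile_en_reduisant p → Spec_parcourir_pile_en_reduisant p (parcourir_pile_en_reduisant p)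

-- ===== LEMMAS AND PROOFS =====

theorem getLastD_take (arr : List Int) (L : Nat) (h1 : 1 ≤ L) (h2 : L ≤ arr.length) :
    (arr.take L).getLastD 0 = arr.getD (L - 1) 0 := by
  rw [List.getLastD_eq_getLast?, List.getLast?_take, List.getD_eq_getElem?_getD]
  have hL0 : L ≠ 0 := by omega
  simp only [hL0, if_false]
  rw [(List.getElem?_eq_getElem (by omega) : arr[L-1]? = some arr[L-1])]
  simp

theorem dropLast_take (arr : List Int) (L : Nat) (h : L ≤ arr.length) :
    (arr.take L).dropLast = arr.take (L - 1) := by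
  rw [List.dropLast_eq_take, List.length_take, List.take_take]
  congr 1
  omega

theorem take_concat (arr : List Int) (L : Nat) (h : L < arr.length) :
    arr.take L ++ [arr.getD L 0] = arr.take (L + 1) := by
  rw [List.take_add_one, List.getD_eq_getElem?_getD,
      (List.getElem?_eq_getElem h : arr[L]? = some arr[L])]
  rfl

theorem loopA_eq_loopB (arr : List Int) (L : Nat) (q : List Int) (hL : L ≤ arr.length) :
    pvLoopA (arr.take L) q = ((arr.take (pvLoopB arr L q).1, (pvLoopB arr L q).2)) := by
  induction L using Nat.strong_induction_on generalizing q with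
  | _ L ih =>
  by_cases h3 : 3 ≤ L
  · have hlen : (arr.take L).length = L := by simp; omega
    have ha : (arr.take L).getLastD 0 = arr.getD (L - 1) 0 :=
      getLastD_take arr L (by omega) hL
    have hd1 : (arr.take L).dropLast = arr.take (L - 1) := dropLast_take arr L hL
    have hb : (arr.take (L - 1)).getLastD 0 = arr.getD (L - 2) 0 := by
      rw [getLastD_take arr (L - 1) (by omega) (by omega)]; congr 1 <;> omega
    have hd2 : (arr.take (L - 1)).dropLast = arr.take (L - 2) := by
      rw [dropLast_take arr (L - 1) (by omega)]; congr 1 <;> omega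
    have hc : (arr.take (L - 2)).getLastD 0 = arr.getD (L - 3) 0 := by
      rw [getLastD_take arr (L - 2) (by omega) (by omega)]; congr 1 <;> omega
    have hred : pvReduireTriplet (arr.take L) =
        (if PySem.Int.mod (arr.getD (L - 1) 0) 2 ≠ PySem.Int.mod (arr.getD (L - 3) 0) 2
          then arr.take (L - 2) ++ [arr.getD (L - 2) 0] else arr.take (L - 2))
        ++ [arr.getD (L - 1) 0] := by
      unfold pvReduireTriplet
      simp only [ha, hd1, hb, hd2, hc]
    rw [pvLoopA]
    simp only [hlen, h3, dif_pos, hred]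
    rw [pvLoopB, if_pos h3]
    by_cases hcond :
        PySem.Int.mod (arr.getD (L - 1) 0) 2 ≠ PySem.Int.mod (arr.getD (L - 3) 0) 2
    · simp only [if_pos hcond]
      have hcc : arr.take (L - 2) ++ [arr.getD (L - 2) 0] = arr.take (L - 1) := by
        have := take_concat arr (L - 2) (by omega)
        rw [this]; congr 1 <;> omega
      rw [hcc, List.getLastD_concat, List.dropLast_concat]
      exact ih (L - 1) (by omega) (q ++ [arr.getD (L - 1) 0]) (by omega)
    · simp only [if_neg hcond]
      rw [List.getLastD_concat, List.dropLast_concat]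
      exact ih (L - 2) (by omega) (q ++ [arr.getD (L - 1) 0]) (by omega)
  · rw [pvLoopA, dif_neg (by simp; omega), pvLoopB, if_neg h3]

theorem loopQ_eq (np q : List Int) : pvLoopQ np q = np ++ q.reverse := by
  induction q using List.reverseRecOn generalizing np with
  | nil => simp [pvLoopQ]
  | append_singleton xs x ih =>
    rw [pvLoopQ]
    simp only [List.append_ne_nil_of_right_ne_nil _ (by simp : ([x]:List Int) ≠ []), if_false,
      List.getLastD_concat, List.dropLast_concat, ih]
    simp

-- ===== VERDICT (by name: the statement is the Claim_ definition above) =====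
theorem parcourir_pile_en_reduisant_spec : Claim_equal_parcourir_pile_en_reduisant := by
  intro p _
  unfold Spec_parcourir_pile_en_reduisant parcourir_pile_en_reduisant parcourir_pile_en_reduisant_alt
  have h := loopA_eq_loopB p p.length [] (le_refl _)
  simp only [List.take_length] at h
  simp only [h, loopQ_eq]
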